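-- pv_equiv track=rewrite | github.com/lakubis/LionIsACat | Felix_Learn/Tools.py | clean_positions
-- ===== SOURCE A (Python) =====
-- def clean_positions(positions):
--     clean_pos = [] # We'll store the clean positions here
--     # We'll work through the last position to the first
--     for i in range(len(positions)-1,0,-1):
--         if positions[i] == positions[i - 1]:
--             pass
--         elif positions[i] != positions[i - 1]:
--             clean_pos.append(positions[i])
--
--     return clean_pos
-- ===== SOURCE B (Python) =====
-- def clean_positions(positions):
--     # Compress consecutive runs in ONE forward pass, then drop the first
--     # run's representative and reverse -- same value as A's backward scan.
--     reps = []
--     for x in positions: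
--         if not reps or reps[-1] != x:
--             reps.append(x)
--     return list(reversed(reps[1:]))
-- ===== Notes on version B (the rewrite author's own statement) =====
-- stated objective: idiomatic
-- what changed: Replaces the backward index loop comparing positions[i] with positions[i-1] by a forward run-compression pass (adjacent-duplicate removal) followed by dropping the first representative and reversing.
import Mathlib
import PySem

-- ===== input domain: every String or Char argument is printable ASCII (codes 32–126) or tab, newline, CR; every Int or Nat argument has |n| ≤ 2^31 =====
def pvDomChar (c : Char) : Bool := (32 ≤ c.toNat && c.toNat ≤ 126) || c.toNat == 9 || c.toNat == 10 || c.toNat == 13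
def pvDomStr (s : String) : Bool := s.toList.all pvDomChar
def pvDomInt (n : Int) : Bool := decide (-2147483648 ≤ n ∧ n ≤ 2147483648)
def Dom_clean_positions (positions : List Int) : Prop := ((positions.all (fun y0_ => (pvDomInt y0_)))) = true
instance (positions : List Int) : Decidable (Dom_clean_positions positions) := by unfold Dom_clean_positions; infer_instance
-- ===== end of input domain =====

-- B replaces A's backward index loop with a forward run-compression pass followed by
-- dropping the first representative and reversing (idiomatic; same O(n) cost).
-- ===== PORT A =====
-- for i in range(len(positions)-1, 0, -1): if p[i]==p[i-1]: pass elif p[i]!=p[i-1]: append p[i]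
def clean_positions (positions : List Int) : List Int :=
  (PySem.List.pyRange ((positions.length : Int) - 1) 0 (-1)).foldl
    (fun clean_pos i =>
      if PySem.List.pyGetD positions i 0 = PySem.List.pyGetD positions (i - 1) 0 then
        clean_pos
      else if PySem.List.pyGetD positions i 0 ≠ PySem.List.pyGetD positions (i - 1) 0 then
        clean_pos ++ [PySem.List.pyGetD positions i 0]
      else
        clean_pos) []

-- ===== PORT B =====
-- B: one forward run-compression pass, then reversed(reps[1:])
def clean_positions_alt (positions : List Int) : List Int :=
  let reps := positions.foldl
    (fun reps x =>
      if reps = [] ∨ PySem.List.pyGet? reps (-1) ≠ some x then reps ++ [x] else reps) []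
  (PySem.List.slice reps (some 1) none).reverse

-- ===== PRECONDITION & SPEC =====
def Spec_clean_positions (positions : List Int) (out : List Int) : Prop := out = clean_positions_alt positions
instance (positions : List Int) (out : List Int) : Decidable (Spec_clean_positions positions out) := by unfold Spec_clean_positions; infer_instance

-- ===== CLAIM (what is proved, stated in full; the proofs are below) =====
def Claim_equal_clean_positions : Prop := ∀ (positions : List Int), Dom_clean_positions positions → Spec_clean_positions positions (clean_positions positions)

-- ===== LEMMAS AND PROOFS =====

/-- Representatives of the consecutive runs of `ys`, given previous value `prev`. -/
def tailRuns (prev : Int) : List Int → List Int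
  | [] => []
  | y :: ys => if y = prev then tailRuns prev ys else y :: tailRuns y ys

-- B-side: the run-compression fold, with a non-empty accumulator ending in `a`.
theorem foldl_step_eq (ys : List Int) : ∀ (rest : List Int) (a : Int),
    ys.foldl (fun reps x =>
      if reps = [] ∨ PySem.List.pyGet? reps (-1) ≠ some x then reps ++ [x] else reps)
      (rest ++ [a]) = rest ++ [a] ++ tailRuns a ys := by
  induction ys with
  | nil => intro rest a; simp [tailRuns]
  | cons y ys ih =>
    intro rest a
    simp only [List.foldl_cons, tailRuns, PySem.List.pyGet?_neg_one_append_singleton]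
    by_cases h : y = a
    · subst h; simp [ih rest y]
    · rw [if_neg h, if_pos (Or.inr (by simpa using fun hh => h hh.symm))]
      have := ih (rest ++ [a]) y
      simpa using this

theorem alt_nil : clean_positions_alt [] = [] := by decide

theorem alt_cons (x : Int) (xs : List Int) :
    clean_positions_alt (x :: xs) = (tailRuns x xs).reverse := by
  unfold clean_positions_alt
  simp only [List.foldl_cons]
  rw [if_pos (Or.inl trivial), foldl_step_eq, PySem.List.slice_from_one]
  simp

-- A-side: the index-filtered collection equals `tailRuns`, before reversing.
theorem idx_filter_eq (xs : List Int) : ∀ (x : Int),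
    ((List.range xs.length).filter
        (fun k => decide ((x :: xs).getD (k + 1) 0 ≠ (x :: xs).getD k 0))).map
      (fun k => (x :: xs).getD (k + 1) 0) = tailRuns x xs := by
  induction xs with
  | nil => intro x; simp [tailRuns]
  | cons y ys ih =>
    intro x
    rw [List.length_cons, List.range_succ_eq_map]
    simp only [List.filter_cons, List.filter_map, tailRuns]
    by_cases h : y = x
    · subst h
      simpa [Function.comp_def] using ih y
    · simpa [h, Function.comp_def] using ih y

theorem a_nil : clean_positions [] = [] := by decide

theorem a_cons (x : Int) (xs : List Int) :
    clean_positions (x :: xs) = (tailRuns x xs).reverse := by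
  unfold clean_positions
  have hfun : (fun (clean_pos : List Int) (i : Int) =>
      if PySem.List.pyGetD (x :: xs) i 0 = PySem.List.pyGetD (x :: xs) (i - 1) 0 then
        clean_pos
      else if PySem.List.pyGetD (x :: xs) i 0 ≠ PySem.List.pyGetD (x :: xs) (i - 1) 0 then
        clean_pos ++ [PySem.List.pyGetD (x :: xs) i 0]
      else clean_pos)
      = fun (clean_pos : List Int) (i : Int) =>
      if PySem.List.pyGetD (x :: xs) i 0 ≠ PySem.List.pyGetD (x :: xs) (i - 1) 0 then
        clean_pos ++ [PySem.List.pyGetD (x :: xs) i 0]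
      else clean_pos := by
    funext acc i
    by_cases h : PySem.List.pyGetD (x :: xs) i 0 = PySem.List.pyGetD (x :: xs) (i - 1) 0 <;>
      simp [h]
  rw [hfun, PySem.List.foldl_append_ite, PySem.List.pyRange_neg_one_eq_reverse,
    List.filter_reverse, List.map_reverse, List.nil_append]
  congr 1
  rw [PySem.List.pyRange_one]
  simp only [zero_add]
  have hlen : ((((x :: xs).length : Int) - 1 + 1) - 1).toNat = xs.length := by
    simp only [List.length_cons]; omega
  rw [hlen, List.filter_map, List.map_map]
  have hidx : ∀ k : Nat, PySem.List.pyGetD (x :: xs) (1 + (k : Int)) 0 = (x :: xs).getD (k + 1) 0 := by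
    intro k
    have h : (1 + (k : Int)) = (((k + 1 : Nat)) : Int) := by push_cast [Nat.cast_add]; ring
    rw [h, PySem.List.pyGetD_natCast]
  have hidx' : ∀ k : Nat, PySem.List.pyGetD (x :: xs) ((1 : Int) + (k : Int) - 1) 0 = (x :: xs).getD k 0 := by
    intro k
    have h : ((1 : Int) + (k : Int) - 1) = ((k : Nat) : Int) := by omega
    rw [h, PySem.List.pyGetD_natCast]
  have e1 : (List.range xs.length).filter
      ((fun i => decide (PySem.List.pyGetD (x :: xs) i 0 ≠ PySem.List.pyGetD (x :: xs) (i - 1) 0)) ∘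
        (fun k : Nat => (1 : Int) + (k : Int)))
      = (List.range xs.length).filter
        (fun k => decide ((x :: xs).getD (k + 1) 0 ≠ (x :: xs).getD k 0)) :=
    List.filter_congr (fun k _ => by simp only [Function.comp_def, hidx k, hidx' k])
  rw [e1]
  have e2 : ((List.range xs.length).filter
        (fun k => decide ((x :: xs).getD (k + 1) 0 ≠ (x :: xs).getD k 0))).map
      ((fun i => PySem.List.pyGetD (x :: xs) i 0) ∘ (fun k : Nat => (1 : Int) + (k : Int)))
      = ((List.range xs.length).filter
        (fun k => decide ((x :: xs).getD (k + 1) 0 ≠ (x :: xs).getD k 0))).map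
      (fun k => (x :: xs).getD (k + 1) 0) :=
    List.map_congr_left (fun k _ => by simp only [Function.comp_def]; exact hidx k)
  rw [e2]
  exact idx_filter_eq xs x

-- ===== VERDICT (by name: the statement is the Claim_ definition above) =====
theorem clean_positions_spec : Claim_equal_clean_positions := by
  intro positions _
  unfold Spec_clean_positions
  cases positions with
  | nil => rw [a_nil, alt_nil]
  | cons x xs => rw [a_cons, alt_cons]
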